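-- pv_equiv track=rewrite | github.com/mizuharaa/Nexus | backend/app/services/analysis_service.py | _match_summaries_to_domain
-- ===== SOURCE A (Python) =====
-- def _match_summaries_to_domain(
--     domain: dict, file_summaries: list[dict]
-- ) -> list[dict]:
--     """Find file summaries relevant to a domain based on anchor files and paths."""
--     anchor_files = set(domain.get("anchor_files", []))
--     if not anchor_files:
--         return file_summaries  # fallback: send all summaries
--
--     # Find summaries whose file_path matches or is in the same directory as an anchor
--     anchor_dirs = set()
--     for af in anchor_files:
--         parts = af.rsplit("/", 1)
--         if len(parts) > 1:
--             anchor_dirs.add(parts[0])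
--
--     matched = []
--     for s in file_summaries:
--         fp = s["file_path"]
--         if fp in anchor_files:
--             matched.append(s)
--         elif any(fp.startswith(d + "/") for d in anchor_dirs):
--             matched.append(s)
--
--     # If too few matched, return all summaries as fallback
--     return matched if len(matched) >= 2 else file_summaries
-- ===== SOURCE B (Python) =====
-- def _ancestors(fp):
--     # every prefix of fp that ends just before a "/"
--     return [fp[:i] for i, ch in enumerate(fp) if ch == "/"]
--
--
-- def _match_summaries_to_domain(
--     domain: dict, file_summaries: list[dict]
-- ) -> list[dict]:
--     """Find file summaries relevant to a domain based on anchor files and paths."""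
--     anchor_files = set(domain.get("anchor_files", []))
--     if not anchor_files:
--         return file_summaries  # fallback: send all summaries
--
--     anchor_dirs = {af.rsplit("/", 1)[0] for af in anchor_files if "/" in af}
--
--     matched = [
--         s
--         for s in file_summaries
--         if s["file_path"] in anchor_files
--         or any(pfx in anchor_dirs for pfx in _ancestors(s["file_path"]))
--     ]
--
--     return matched if len(matched) >= 2 else file_summaries
-- ===== Notes on version B (the rewrite author's own statement) =====
-- stated objective: alternative
-- what changed: Instead of testing each summary path against every anchor directory (any(fp.startswith(d + '/') ...)), B enumerates each path's own ancestor prefixes (one per '/') and checks them by set lookup in anchor_dirs; per summary this is O(depth) lookups instead of a scan over all anchor dirs, trading the dependence on the number of anchor dirs for one on the path's depth.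
import Mathlib
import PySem

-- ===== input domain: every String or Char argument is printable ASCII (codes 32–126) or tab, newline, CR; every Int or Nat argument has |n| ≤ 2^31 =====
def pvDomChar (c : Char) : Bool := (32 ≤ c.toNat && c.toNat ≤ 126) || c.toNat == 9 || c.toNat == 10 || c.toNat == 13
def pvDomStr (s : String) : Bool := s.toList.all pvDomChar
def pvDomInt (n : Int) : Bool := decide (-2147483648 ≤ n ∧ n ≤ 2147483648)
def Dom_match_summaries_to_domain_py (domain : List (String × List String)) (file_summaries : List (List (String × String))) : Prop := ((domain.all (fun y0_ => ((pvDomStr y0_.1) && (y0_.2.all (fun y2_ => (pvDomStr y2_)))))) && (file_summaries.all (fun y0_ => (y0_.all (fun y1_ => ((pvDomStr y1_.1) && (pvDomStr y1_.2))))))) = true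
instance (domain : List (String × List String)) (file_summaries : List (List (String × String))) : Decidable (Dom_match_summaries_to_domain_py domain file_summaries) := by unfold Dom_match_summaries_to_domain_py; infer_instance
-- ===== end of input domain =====

-- B replaces A's per-summary scan over all anchor directories by a set lookup of each
-- path's own ancestor prefixes (objective: alternative); return values proved equal under Pre_.


-- ===== PORT A =====
-- hand port of Python's `s.rsplit("/", 1)` on a list of chars (PySem has no rsplit);
-- exact: one split at the LAST '/', or the whole string as a single part if there is none
def pvRsplitSlash1 (cs : List Char) : List (List Char) :=
  match cs.reverse.findIdx? (· == '/') with
  | none => [cs]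
  | some k => let j := cs.length - 1 - k
              [cs.take j, cs.drop (j + 1)]

def match_summaries_to_domain_py (domain : List (String × List String)) (file_summaries : List (List (String × String))) : List (List (String × String)) :=
  let anchorFiles : PySem.Set String := PySem.Set.ofList (PySem.Dict.getD (PySem.Dict.mk domain) "anchor_files" [])
  if anchorFiles.isEmpty then file_summaries
  else
    let anchorDirs : PySem.Set (List Char) :=
      anchorFiles.foldl (fun ds af =>
        let parts := pvRsplitSlash1 af.toList
        if parts.length > 1 then PySem.Set.add ds (PySem.List.pyGetD parts 0 []) else ds) []
    let matched : List (List (String × String)) :=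
      file_summaries.foldl (fun acc s =>
        let fp := (PySem.Dict.get? (PySem.Dict.mk s) "file_path").getD ""   -- Pre_ excludes the KeyError (none) case
        if PySem.Set.contains anchorFiles fp then acc ++ [s]
        else if anchorDirs.any (fun d => PySem.Chars.startswith fp.toList (d ++ ['/'])) then acc ++ [s]
        else acc) []
    if 2 ≤ matched.length then matched else file_summaries

-- ===== PORT B =====
-- the prefixes fp[:i] at each i with fp[i] == '/'
def pvAncestors (fp : List Char) : List (List Char) :=
  ((PySem.List.enumerate fp).filter (fun p => p.2 == '/')).map
    (fun p => PySem.List.slice fp none (some p.1))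

def match_summaries_to_domain_py_alt (domain : List (String × List String)) (file_summaries : List (List (String × String))) : List (List (String × String)) :=
  let anchorFiles : PySem.Set String := PySem.Set.ofList (PySem.Dict.getD (PySem.Dict.mk domain) "anchor_files" [])
  if anchorFiles.isEmpty then file_summaries
  else
    let anchorDirs : PySem.Set (List Char) :=
      PySem.Set.ofList ((anchorFiles.filter (fun af => PySem.Str.isIn "/" af)).map
        (fun af => PySem.List.pyGetD (pvRsplitSlash1 af.toList) 0 []))
    let matched : List (List (String × String)) :=
      file_summaries.filter (fun s =>
        let fp := (PySem.Dict.get? (PySem.Dict.mk s) "file_path").getD ""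
        PySem.Set.contains anchorFiles fp ||
          (pvAncestors fp.toList).any (fun pfx => PySem.Set.contains anchorDirs pfx))
    if 2 ≤ matched.length then matched else file_summaries

-- ===== PRECONDITION & SPEC =====
-- Pre_ excludes exactly the inputs where Python A raises KeyError: some summary lacks the
-- "file_path" key while anchor_files is nonempty.
def Pre_match_summaries_to_domain_py (domain : List (String × List String)) (file_summaries : List (List (String × String))) : Prop :=
  PySem.Dict.getD (PySem.Dict.mk domain) "anchor_files" [] = [] ∨
    ∀ s ∈ file_summaries, (PySem.Dict.get? (PySem.Dict.mk s) "file_path").isSome = true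
instance (domain : List (String × List String)) (file_summaries : List (List (String × String))) : Decidable (Pre_match_summaries_to_domain_py domain file_summaries) := by unfold Pre_match_summaries_to_domain_py; infer_instance

def pvWitness_match_summaries_to_domain_py : (List (String × List String)) × (List (List (String × String))) :=
  ([("anchor_files", ["src/a.py", "src/b.py"])],
   [[("file_path", "src/c.py")], [("file_path", "src/a.py")], [("file_path", "doc/x")]])

def Spec_match_summaries_to_domain_py (domain : List (String × List String)) (file_summaries : List (List (String × String))) (out : List (List (String × String))) : Prop := out = match_summaries_to_domain_py_alt domain file_summaries
instance (domain : List (String × List String)) (file_summaries : List (List (String × String))) (out : List (List (String × String))) : Decidable (Spec_match_summaries_to_domain_py domain file_summaries out) := by unfold Spec_match_summaries_to_domain_py; infer_instance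

-- ===== CLAIM (what is proved, stated in full; the proofs are below) =====
def Claim_equal_match_summaries_to_domain_py : Prop := ∀ (domain : List (String × List String)) (file_summaries : List (List (String × String))), Dom_match_summaries_to_domain_py domain file_summaries → Pre_match_summaries_to_domain_py domain file_summaries → Spec_match_summaries_to_domain_py domain file_summaries (match_summaries_to_domain_py domain file_summaries)

-- ===== LEMMAS AND PROOFS =====

-- rsplit("/", 1) yields more than one part exactly when the string contains '/'
theorem pvRsplitSlash1_length (cs : List Char) :
    ((pvRsplitSlash1 cs).length > 1) ↔ '/' ∈ cs := by
  unfold pvRsplitSlash1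
  rcases h : cs.reverse.findIdx? (· == '/') with _ | k
  · simp only [List.findIdx?_eq_none_iff] at h
    simp only [List.length_singleton]
    constructor
    · omega
    · intro hm
      have := h '/' (by simpa using hm)
      simp at this
  · have hm : '/' ∈ cs := by
      obtain ⟨hk, h2, _⟩ := List.findIdx?_eq_some_iff_getElem.mp h
      have hc : cs.reverse[k] = '/' := by simpa using h2
      have := hc ▸ cs.reverse.getElem_mem hk
      simpa using this
    simp [hm]

-- the two anchor-dir conditions are the same Bool
theorem pvSlashCond_eq (af : String) :
    (decide ((pvRsplitSlash1 af.toList).length > 1)) = PySem.Str.isIn "/" af := by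
  rw [Bool.eq_iff_iff]
  rw [PySem.Str.isIn_iff_infix]
  simp [pvRsplitSlash1_length, List.singleton_infix_iff]

-- A's anchor_dirs loop builds B's anchor_dirs set comprehension
theorem pvAnchorDirs_eq (afs : List String) :
    (afs.foldl (fun ds af =>
        let parts := pvRsplitSlash1 af.toList
        if parts.length > 1 then PySem.Set.add ds (PySem.List.pyGetD parts 0 []) else ds)
      ([] : PySem.Set (List Char))) =
    PySem.Set.ofList ((afs.filter (fun af => PySem.Str.isIn "/" af)).map
        (fun af => PySem.List.pyGetD (pvRsplitSlash1 af.toList) 0 [])) := by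
  rw [PySem.Set.ofList_eq_foldl, List.foldl_map,
    ← PySem.List.foldl_if_eq_foldl_filter (p := fun af => PySem.Str.isIn "/" af)]
  apply PySem.List.foldl_congr_mem
  intro acc af _
  rw [← pvSlashCond_eq af]
  simp

-- membership in enumerate
theorem pvMem_enumerate {α : Type} (xs : List α) (s : Int) (p : Int × α) :
    p ∈ PySem.List.enumerate xs s ↔
      ∃ k : Nat, xs[k]? = some p.2 ∧ p.1 = s + k := by
  induction xs generalizing s with
  | nil => simp [PySem.List.enumerate]
  | cons x t ih =>
    rw [PySem.List.enumerate_cons]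
    constructor
    · intro h
      rcases List.mem_cons.mp h with h | h
      · exact ⟨0, by simp [h], by simp [h]⟩
      · rcases (ih (s + 1)).mp h with ⟨k, h1, h2⟩
        exact ⟨k + 1, by simpa using h1, by push_cast; omega⟩
    · rintro ⟨k, h1, h2⟩
      cases k with
      | zero =>
        simp only [List.getElem?_cons_zero, Option.some.injEq] at h1
        simp only [Nat.cast_zero, add_zero] at h2
        have : p = (s, x) := by
          apply Prod.ext <;> simp [h1, h2]
        rw [this]; exact List.mem_cons_self
      | succ k =>
        apply List.mem_cons_of_mem
        exact (ih (s + 1)).mpr ⟨k, by simpa using h1, by push_cast at h2 ⊢; omega⟩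

-- (d ++ "/") is a prefix of fp  ↔  fp has '/' right after its prefix d
theorem pvAppend_slash_prefix_iff (d fp : List Char) :
    (d ++ ['/']) <+: fp ↔ fp[d.length]? = some '/' ∧ fp.take d.length = d := by
  constructor
  · rintro ⟨t, ht⟩
    subst ht
    refine ⟨?_, ?_⟩
    · rw [List.append_assoc, List.getElem?_append_right (by simp)]
      simp
    · rw [List.append_assoc, List.take_left']
      simp
  · rintro ⟨h1, h2⟩
    have hk : d.length < fp.length := (List.getElem?_eq_some_iff.mp h1).1
    refine ⟨fp.drop (d.length + 1), ?_⟩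
    conv_rhs => rw [← List.take_append_drop d.length fp]
    rw [h2, List.drop_eq_getElem_cons hk]
    simp [(List.getElem?_eq_some_iff.mp h1).2]

-- membership in pvAncestors
theorem pvMem_pvAncestors (fp pfx : List Char) :
    pfx ∈ pvAncestors fp ↔ ∃ k : Nat, fp[k]? = some '/' ∧ pfx = fp.take k := by
  unfold pvAncestors
  simp only [List.mem_map, List.mem_filter, beq_iff_eq]
  constructor
  · rintro ⟨p, ⟨hp, hc⟩, rfl⟩
    rcases (pvMem_enumerate fp 0 p).mp hp with ⟨k, h1, h2⟩
    refine ⟨k, by rw [← hc]; exact h1, ?_⟩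
    rw [h2]
    simp [PySem.List.slice_to_natCast]
  · rintro ⟨k, h1, rfl⟩
    refine ⟨((k : Int), '/'), ⟨(pvMem_enumerate fp 0 _).mpr ⟨k, by simpa using h1, by simp⟩, rfl⟩, ?_⟩
    simp [PySem.List.slice_to_natCast]

-- the two matching tests agree: startswith over every dir = ancestor-prefix lookup
theorem pvAny_startswith_eq_any_ancestor (dirs : List (List Char)) (fp : List Char) :
    (dirs.any fun d => PySem.Chars.startswith fp (d ++ ['/'])) =
      ((pvAncestors fp).any fun pfx => dirs.contains pfx) := by
  rw [Bool.eq_iff_iff]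
  simp only [List.any_eq_true, PySem.Chars.startswith_iff, List.contains_eq_mem,
    decide_eq_true_eq, pvAppend_slash_prefix_iff, pvMem_pvAncestors]
  constructor
  · rintro ⟨d, hd, h1, h2⟩
    exact ⟨fp.take d.length, ⟨d.length, h1, rfl⟩, by rwa [h2]⟩
  · rintro ⟨pfx, ⟨k, h1, rfl⟩, hd⟩
    have hk : k < fp.length := (List.getElem?_eq_some_iff.mp h1).1
    have hlen : (fp.take k).length = k := by simp [Nat.min_eq_left hk.le]
    exact ⟨fp.take k, hd, by rw [hlen]; exact h1, by rw [hlen]⟩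

-- A's matched loop builds B's matched filter
theorem pvMatched_eq (anchorFiles : PySem.Set String) (dirs : PySem.Set (List Char))
    (fs : List (List (String × String))) :
    (fs.foldl (fun acc s =>
        let fp := (PySem.Dict.get? (PySem.Dict.mk s) "file_path").getD ""
        if PySem.Set.contains anchorFiles fp then acc ++ [s]
        else if dirs.any (fun d => PySem.Chars.startswith fp.toList (d ++ ['/'])) then acc ++ [s]
        else acc) []) =
    fs.filter (fun s =>
        let fp := (PySem.Dict.get? (PySem.Dict.mk s) "file_path").getD ""
        PySem.Set.contains anchorFiles fp ||
          (pvAncestors fp.toList).any (fun pfx => PySem.Set.contains dirs pfx)) := by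
  have h1 : ∀ (acc : List (List (String × String))) (s : List (String × String)),
      (let fp := (PySem.Dict.get? (PySem.Dict.mk s) "file_path").getD ""
       if PySem.Set.contains anchorFiles fp then acc ++ [s]
       else if dirs.any (fun d => PySem.Chars.startswith fp.toList (d ++ ['/'])) then acc ++ [s]
       else acc) =
      (if (let fp := (PySem.Dict.get? (PySem.Dict.mk s) "file_path").getD ""
           PySem.Set.contains anchorFiles fp ||
             (pvAncestors fp.toList).any (fun pfx => PySem.Set.contains dirs pfx))
       then acc ++ [s] else acc) := by
    intro acc s
    simp only [pvAny_startswith_eq_any_ancestor (dirs := dirs), PySem.Set.contains_eq_listContains]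
    split_ifs <;> simp_all <;> tauto
  calc (fs.foldl (fun acc s =>
        let fp := (PySem.Dict.get? (PySem.Dict.mk s) "file_path").getD ""
        if PySem.Set.contains anchorFiles fp then acc ++ [s]
        else if dirs.any (fun d => PySem.Chars.startswith fp.toList (d ++ ['/'])) then acc ++ [s]
        else acc) [])
      = fs.foldl (fun acc s =>
          if (let fp := (PySem.Dict.get? (PySem.Dict.mk s) "file_path").getD ""
              PySem.Set.contains anchorFiles fp ||
                (pvAncestors fp.toList).any (fun pfx => PySem.Set.contains dirs pfx))
          then acc ++ [s] else acc) [] := by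
        apply PySem.List.foldl_congr_mem
        intro acc s _
        exact h1 acc s
    _ = _ := by
        rw [PySem.List.foldl_append_if_eq_filter]
        simp

-- ===== VERDICT (by name: the statement is the Claim_ definition above) =====
theorem match_summaries_to_domain_py_spec : Claim_equal_match_summaries_to_domain_py := by
  intro domain fs _ _
  unfold Spec_match_summaries_to_domain_py match_summaries_to_domain_py match_summaries_to_domain_py_alt
  simp only [pvAnchorDirs_eq, pvMatched_eq]
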